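-- pv_equiv track=rewrite | github.com/mapleleaflatte03/meridian-kernel | kernel/commitments.py | _settlement_ref_matches
-- ===== SOURCE A (Python) =====
-- def _settlement_ref_keys(ref):
--     return [
--         (field, value)
--         for field in ('envelope_id', 'receipt_id', 'tx_hash', 'proposal_id', 'tx_ref')
--         for value in [str((ref or {}).get(field) or '').strip()]
--         if value
--     ]
--
-- def _settlement_ref_matches(existing_ref, candidate_ref):
--     existing_keys = _settlement_ref_keys(existing_ref)
--     candidate_keys = _settlement_ref_keys(candidate_ref)
--     for candidate_field, candidate_value in candidate_keys:
--         for existing_field, existing_value in existing_keys: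
--             if candidate_field == existing_field and candidate_value == existing_value:
--                 return True
--     return False
-- ===== SOURCE B (Python) =====
-- def _settlement_ref_matches(existing_ref, candidate_ref):
--     for field in ('envelope_id', 'receipt_id', 'tx_hash', 'proposal_id', 'tx_ref'):
--         ev = str((existing_ref or {}).get(field) or '').strip()
--         cv = str((candidate_ref or {}).get(field) or '').strip()
--         if ev and cv and ev == cv:
--             return True
--     return False
-- ===== Notes on version B (the rewrite author's own statement) =====
-- stated objective: simpler
-- what changed: Replaced the build-two-key-lists-then-nested-compare shape by a single pass over the five field names that compares the two stripped values of the same field directly, since A's nested loop can only ever match pairs with equal field names.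
import Mathlib
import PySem

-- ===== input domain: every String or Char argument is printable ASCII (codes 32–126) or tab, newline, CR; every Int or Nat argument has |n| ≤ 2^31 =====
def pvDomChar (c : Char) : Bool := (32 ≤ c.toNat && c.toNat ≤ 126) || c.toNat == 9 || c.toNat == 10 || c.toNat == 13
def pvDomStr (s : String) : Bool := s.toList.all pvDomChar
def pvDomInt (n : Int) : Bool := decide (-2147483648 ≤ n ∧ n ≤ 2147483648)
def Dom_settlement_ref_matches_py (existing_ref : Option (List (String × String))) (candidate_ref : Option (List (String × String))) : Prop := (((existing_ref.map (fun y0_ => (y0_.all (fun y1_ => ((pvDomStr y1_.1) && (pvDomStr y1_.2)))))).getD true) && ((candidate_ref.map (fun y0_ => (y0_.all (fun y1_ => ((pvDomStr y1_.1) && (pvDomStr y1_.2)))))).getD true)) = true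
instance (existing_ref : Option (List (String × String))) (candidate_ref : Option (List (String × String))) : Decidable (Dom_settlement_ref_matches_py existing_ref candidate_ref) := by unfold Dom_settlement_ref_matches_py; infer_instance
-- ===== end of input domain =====

-- B replaces A's build-two-key-lists-then-nested-compare by one pass over the five
-- field names comparing the two stripped values of the same field directly (simpler).

-- the five-field tuple, shared literal of both Pythons
def pvFields : List String := ["envelope_id", "receipt_id", "tx_hash", "proposal_id", "tx_ref"]

-- str((ref or {}).get(field) or '').strip()  (identical subexpression of both Pythons)
def pvRefVal (ref : Option (List (String × String))) (field : String) : String :=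
  PySem.Str.strip (((PySem.Dict.mk (ref.getD [])).get? field).getD "")

-- ===== PORT A =====
-- _settlement_ref_keys: list comprehension over the fields keeping nonempty stripped values
def settlement_ref_keys (ref : Option (List (String × String))) : List (String × String) :=
  pvFields.filterMap (fun field =>
    let value := pvRefVal ref field
    if value = "" then none else some (field, value))

-- inner 'for existing_field, existing_value in existing_keys'
def pvLoopInner (cf cv : String) : List (String × String) → Bool
  | [] => false
  | (ef, ev) :: rest => if cf = ef ∧ cv = ev then true else pvLoopInner cf cv rest

-- outer 'for candidate_field, candidate_value in candidate_keys'
def pvLoopOuter (existing_keys : List (String × String)) : List (String × String) → Bool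
  | [] => false
  | (cf, cv) :: rest =>
    if pvLoopInner cf cv existing_keys then true else pvLoopOuter existing_keys rest

def settlement_ref_matches_py (existing_ref : Option (List (String × String))) (candidate_ref : Option (List (String × String))) : Bool :=
  pvLoopOuter (settlement_ref_keys existing_ref) (settlement_ref_keys candidate_ref)

-- ===== PORT B =====
-- single pass over the field tuple
def pvBLoop (existing_ref candidate_ref : Option (List (String × String))) : List String → Bool
  | [] => false
  | field :: rest =>
    let ev := pvRefVal existing_ref field
    let cv := pvRefVal candidate_ref field
    if ev ≠ "" ∧ cv ≠ "" ∧ ev = cv then true else pvBLoop existing_ref candidate_ref rest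

def settlement_ref_matches_py_alt (existing_ref : Option (List (String × String))) (candidate_ref : Option (List (String × String))) : Bool :=
  pvBLoop existing_ref candidate_ref pvFields

-- ===== PRECONDITION & SPEC =====
def Spec_settlement_ref_matches_py (existing_ref : Option (List (String × String))) (candidate_ref : Option (List (String × String))) (out : Bool) : Prop := out = settlement_ref_matches_py_alt existing_ref candidate_ref
instance (existing_ref : Option (List (String × String))) (candidate_ref : Option (List (String × String))) (out : Bool) : Decidable (Spec_settlement_ref_matches_py existing_ref candidate_ref out) := by unfold Spec_settlement_ref_matches_py; infer_instance

-- ===== CLAIM (what is proved, stated in full; the proofs are below) =====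
def Claim_equal_settlement_ref_matches_py : Prop := ∀ (existing_ref : Option (List (String × String))) (candidate_ref : Option (List (String × String))), Dom_settlement_ref_matches_py existing_ref candidate_ref → Spec_settlement_ref_matches_py existing_ref candidate_ref (settlement_ref_matches_py existing_ref candidate_ref)

-- ===== LEMMAS AND PROOFS =====

theorem pvLoopInner_eq_true (cf cv : String) (ks : List (String × String)) :
    pvLoopInner cf cv ks = true ↔ ∃ q ∈ ks, cf = q.1 ∧ cv = q.2 := by
  induction ks with
  | nil => simp [pvLoopInner]
  | cons q rest ih =>
    obtain ⟨ef, ev⟩ := q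
    by_cases h : cf = ef ∧ cv = ev <;> simp [pvLoopInner, h, ih]

theorem pvLoopOuter_eq_true (ek ks : List (String × String)) :
    pvLoopOuter ek ks = true ↔ ∃ p ∈ ks, pvLoopInner p.1 p.2 ek = true := by
  induction ks with
  | nil => simp [pvLoopOuter]
  | cons p rest ih =>
    obtain ⟨cf, cv⟩ := p
    by_cases h : pvLoopInner cf cv ek = true <;> simp [pvLoopOuter, h, ih]

theorem pvBLoop_eq_true (e c : Option (List (String × String))) (L : List String) :
    pvBLoop e c L = true ↔
      ∃ f ∈ L, pvRefVal e f ≠ "" ∧ pvRefVal c f ≠ "" ∧ pvRefVal e f = pvRefVal c f := by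
  induction L with
  | nil => simp [pvBLoop]
  | cons f rest ih =>
    by_cases h : pvRefVal e f ≠ "" ∧ pvRefVal c f ≠ "" ∧ pvRefVal e f = pvRefVal c f <;>
      simp [pvBLoop, h, ih]
  
theorem mem_settlement_ref_keys (ref : Option (List (String × String))) (p : String × String) :
    p ∈ settlement_ref_keys ref ↔
      ∃ f ∈ pvFields, pvRefVal ref f ≠ "" ∧ p = (f, pvRefVal ref f) := by
  unfold settlement_ref_keys
  simp only [List.mem_filterMap]
  constructor
  · rintro ⟨f, hf, hv⟩
    by_cases h : pvRefVal ref f = ""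
    · simp [h] at hv
    · simp [h] at hv
      exact ⟨f, hf, h, hv.symm⟩
  · rintro ⟨f, hf, hne, rfl⟩
    exact ⟨f, hf, by simp [hne]⟩

theorem settlement_ref_matches_eq (e c : Option (List (String × String))) :
    settlement_ref_matches_py e c = settlement_ref_matches_py_alt e c := by
  have hA : settlement_ref_matches_py e c = true ↔
      ∃ f ∈ pvFields, pvRefVal e f ≠ "" ∧ pvRefVal c f ≠ "" ∧ pvRefVal e f = pvRefVal c f := by
    unfold settlement_ref_matches_py
    rw [pvLoopOuter_eq_true]
    constructor
    · rintro ⟨p, hp, hin⟩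
      rw [pvLoopInner_eq_true] at hin
      obtain ⟨q, hq, h1, h2⟩ := hin
      rw [mem_settlement_ref_keys] at hp hq
      obtain ⟨f, hf, hfne, rfl⟩ := hp
      obtain ⟨g, hg, hgne, rfl⟩ := hq
      simp only at h1 h2
      subst h1
      exact ⟨f, hf, hgne, hfne, h2.symm⟩
    · rintro ⟨f, hf, hene, hcne, heq⟩
      refine ⟨(f, pvRefVal c f), ?_, ?_⟩
      · rw [mem_settlement_ref_keys]; exact ⟨f, hf, hcne, rfl⟩
      · rw [pvLoopInner_eq_true]
        exact ⟨(f, pvRefVal e f), by rw [mem_settlement_ref_keys]; exact ⟨f, hf, hene, rfl⟩,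
          rfl, heq.symm⟩
  have hB : settlement_ref_matches_py_alt e c = true ↔
      ∃ f ∈ pvFields, pvRefVal e f ≠ "" ∧ pvRefVal c f ≠ "" ∧ pvRefVal e f = pvRefVal c f :=
    pvBLoop_eq_true e c pvFields
  by_cases h : ∃ f ∈ pvFields, pvRefVal e f ≠ "" ∧ pvRefVal c f ≠ "" ∧ pvRefVal e f = pvRefVal c f
  · rw [hA.mpr h, hB.mpr h]
  · cases ha' : settlement_ref_matches_py e c with
    | false =>
      cases hb' : settlement_ref_matches_py_alt e c with
      | false => rfl
      | true => exact absurd (hB.mp hb') h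
    | true => exact absurd (hA.mp ha') h

-- ===== VERDICT (by name: the statement is the Claim_ definition above) =====
theorem settlement_ref_matches_py_spec : Claim_equal_settlement_ref_matches_py := by
  intro e c _
  unfold Spec_settlement_ref_matches_py
  exact settlement_ref_matches_eq e c
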